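-- pv_equiv track=rewrite | github.com/gianlucarenzi/agon-vdp-console8 | agon_image_converter.py | find_closest_color_index
-- ===== SOURCE A (Python) =====
-- AGON_PALETTE_RGB = [
--     (0, 0, 0), (0, 0, 85), (0, 0, 170), (0, 0, 255),
--     (0, 85, 0), (0, 85, 85), (0, 85, 170), (0, 85, 255),
--     (0, 170, 0), (0, 170, 85), (0, 170, 170), (0, 170, 255),
--     (0, 255, 0), (0, 255, 85), (0, 255, 170), (0, 255, 255),
--     (85, 0, 0), (85, 0, 85), (85, 0, 170), (85, 0, 255),
--     (85, 85, 0), (85, 85, 85), (85, 85, 170), (85, 85, 255),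
--     (85, 170, 0), (85, 170, 85), (85, 170, 170), (85, 170, 255),
--     (85, 255, 0), (85, 255, 85), (85, 255, 170), (85, 255, 255),
--     (170, 0, 0), (170, 0, 85), (170, 0, 170), (170, 0, 255),
--     (170, 85, 0), (170, 85, 85), (170, 85, 170), (170, 85, 255),
--     (170, 170, 0), (170, 170, 85), (170, 170, 170), (170, 170, 255),
--     (170, 255, 0), (170, 255, 85), (170, 255, 170), (170, 255, 255),
--     (255, 0, 0), (255, 0, 85), (255, 0, 170), (255, 0, 255),
--     (255, 85, 0), (255, 85, 85), (255, 85, 170), (255, 85, 255),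
--     (255, 170, 0), (255, 170, 85), (255, 170, 170), (255, 170, 255),
--     (255, 255, 0), (255, 255, 85), (255, 255, 170), (255, 255, 255)
-- ]
--
-- def find_closest_color_index(rgb):
--     """Finds the closest color in the AGON palette and returns its index."""
--     min_dist = float('inf')
--     best_index = -1
--     for i, palette_color in enumerate(AGON_PALETTE_RGB):
--         dist = sum([(c1 - c2) ** 2 for c1, c2 in zip(rgb, palette_color)])
--         if dist < min_dist:
--             min_dist = dist
--             best_index = i
--     return best_index
-- ===== SOURCE B (Python) =====
-- def find_closest_color_index(rgb):
--     """Closest AGON 4x4x4 palette index via per-channel nearest-level thresholds."""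
--     index = 0
--     for pos, v in zip(range(3), rgb):
--         q = 0 if v <= 42 else 1 if v <= 127 else 2 if v <= 212 else 3
--         index += q * (4 ** (2 - pos))
--     return index
-- ===== Notes on version B (the rewrite author's own statement) =====
-- stated objective: alternative
-- what changed: replaces the exhaustive minimum-distance scan over all 64 palette entries with separable per-channel nearest-level quantization via thresholds, computing the index directly as 16*q(r)+4*q(g)+q(b)
import Mathlib
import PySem

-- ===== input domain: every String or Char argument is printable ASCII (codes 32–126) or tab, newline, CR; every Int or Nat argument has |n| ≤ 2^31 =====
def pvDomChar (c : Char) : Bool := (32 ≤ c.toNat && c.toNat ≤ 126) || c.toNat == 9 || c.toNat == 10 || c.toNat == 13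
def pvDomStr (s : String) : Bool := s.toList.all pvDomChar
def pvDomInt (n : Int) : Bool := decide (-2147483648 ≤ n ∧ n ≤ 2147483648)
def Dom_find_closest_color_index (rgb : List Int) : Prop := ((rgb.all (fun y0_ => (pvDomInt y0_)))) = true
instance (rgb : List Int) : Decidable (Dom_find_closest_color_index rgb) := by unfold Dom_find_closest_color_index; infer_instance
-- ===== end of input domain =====

-- B replaces A's exhaustive scan over the 64-entry 4x4x4 palette with separable per-channel
-- nearest-level quantization (index = 16*q(r)+4*q(g)+q(b) via thresholds); objective: alternative algorithm.

-- ===== PORT A =====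
-- Python palette entries are tuples used only as sequences (zip); ported as 3-element lists.
def AGON_PALETTE_RGB : List (List Int) := [
  [0, 0, 0], [0, 0, 85], [0, 0, 170], [0, 0, 255],
  [0, 85, 0], [0, 85, 85], [0, 85, 170], [0, 85, 255],
  [0, 170, 0], [0, 170, 85], [0, 170, 170], [0, 170, 255],
  [0, 255, 0], [0, 255, 85], [0, 255, 170], [0, 255, 255],
  [85, 0, 0], [85, 0, 85], [85, 0, 170], [85, 0, 255],
  [85, 85, 0], [85, 85, 85], [85, 85, 170], [85, 85, 255],
  [85, 170, 0], [85, 170, 85], [85, 170, 170], [85, 170, 255],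
  [85, 255, 0], [85, 255, 85], [85, 255, 170], [85, 255, 255],
  [170, 0, 0], [170, 0, 85], [170, 0, 170], [170, 0, 255],
  [170, 85, 0], [170, 85, 85], [170, 85, 170], [170, 85, 255],
  [170, 170, 0], [170, 170, 85], [170, 170, 170], [170, 170, 255],
  [170, 255, 0], [170, 255, 85], [170, 255, 170], [170, 255, 255],
  [255, 0, 0], [255, 0, 85], [255, 0, 170], [255, 0, 255],
  [255, 85, 0], [255, 85, 85], [255, 85, 170], [255, 85, 255],
  [255, 170, 0], [255, 170, 85], [255, 170, 170], [255, 170, 255],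
  [255, 255, 0], [255, 255, 85], [255, 255, 170], [255, 255, 255]
]

-- one loop iteration of A: state = (min_dist : Option Int ~ float('inf') as none, best_index)
def pvStepA (rgb : List Int) (st : Option Int × Int) (ip : Int × List Int) : Option Int × Int :=
  let dist := ((rgb.zip ip.2).map (fun ab => (ab.1 - ab.2) ^ 2)).sum
  match st.1 with
  | none => (some dist, ip.1)
  | some m => if dist < m then (some dist, ip.1) else st

def find_closest_color_index (rgb : List Int) : Int :=
  (List.foldl (pvStepA rgb) (none, -1) (PySem.List.enumerate AGON_PALETTE_RGB 0)).2

-- ===== PORT B =====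
-- q(v): nearest of the levels 0,85,170,255 (as a level index 0..3), via thresholds
def pvQ (v : Int) : Int := if v ≤ 42 then 0 else if v ≤ 127 then 1 else if v ≤ 212 then 2 else 3

def find_closest_color_index_alt (rgb : List Int) : Int :=
  List.foldl (fun idx pv => idx + pvQ pv.2 * ((4 ^ (2 - pv.1) : Nat) : Int)) 0
    ((List.range 3).zip rgb)

-- ===== PRECONDITION & SPEC =====
def Spec_find_closest_color_index (rgb : List Int) (out : Int) : Prop := out = find_closest_color_index_alt rgb
instance (rgb : List Int) (out : Int) : Decidable (Spec_find_closest_color_index rgb out) := by unfold Spec_find_closest_color_index; infer_instance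

-- ===== CLAIM (what is proved, stated in full; the proofs are below) =====
def Claim_equal_find_closest_color_index : Prop := ∀ (rgb : List Int), Dom_find_closest_color_index rgb → Spec_find_closest_color_index rgb (find_closest_color_index rgb)

-- ===== LEMMAS AND PROOFS =====


-- distance of rgb to a palette entry, as computed inside A's loop
def pvD (rgb p : List Int) : Int := ((rgb.zip p).map (fun ab => (ab.1 - ab.2) ^ 2)).sum

-- Nat-valued version of B's threshold quantizer
def pvQn (v : Int) : Nat := if v ≤ 42 then 0 else if v ≤ 127 then 1 else if v ≤ 212 then 2 else 3

lemma pvQ_eq (v : Int) : pvQ v = (pvQn v : Int) := by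
  unfold pvQ pvQn; split_ifs <;> rfl

lemma pvQn_lt (v : Int) : pvQn v < 4 := by
  unfold pvQn; split_ifs <;> omega

def pvEntry (i : Nat) : List Int :=
  [85 * ((i / 16 : Nat) : Int), 85 * ((i / 4 % 4 : Nat) : Int), 85 * ((i % 4 : Nat) : Int)]

lemma palette_enum :
    PySem.List.enumerate AGON_PALETTE_RGB 0
      = (List.range 64).map (fun (i : Nat) => ((i : Int), pvEntry i)) := by decide

-- per-channel: pvQn v indexes the unique nearest level among 0,85,170,255
lemma ch_le (v : Int) (k : Nat) (hk : k < 4) :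
    (v - 85 * (pvQn v : Int)) ^ 2 ≤ (v - 85 * (k : Int)) ^ 2 := by
  unfold pvQn
  interval_cases k <;> split_ifs <;> push_cast <;> nlinarith

lemma ch_lt (v : Int) (k : Nat) (hk : k < 4) (hne : k ≠ pvQn v) :
    (v - 85 * (pvQn v : Int)) ^ 2 < (v - 85 * (k : Int)) ^ 2 := by
  unfold pvQn at hne ⊢
  interval_cases k <;> split_ifs at hne ⊢ <;> first
    | omega
    | (push_cast; nlinarith)

lemma fold_post (rgb : List Int) (l : List (Int × List Int)) (m b : Int)
    (h : ∀ p ∈ l, m ≤ pvD rgb p.2) :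
    List.foldl (pvStepA rgb) (some m, b) l = (some m, b) := by
  induction l with
  | nil => rfl
  | cons p l ih =>
    have hp := h p (by simp)
    have hstep : pvStepA rgb (some m, b) p = (some m, b) := by
      simp only [pvStepA, pvD] at hp ⊢
      rw [if_neg (by omega)]
    rw [List.foldl_cons, hstep]
    exact ih (fun q hq => h q (List.mem_cons_of_mem _ hq))

lemma fold_pre (rgb : List Int) (Dj : Int) (l : List (Int × List Int))
    (h : ∀ p ∈ l, Dj < pvD rgb p.2) :
    ∀ st : Option Int × Int, (∀ m, st.1 = some m → Dj < m) →
      ∀ m, (List.foldl (pvStepA rgb) st l).1 = some m → Dj < m := by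
  induction l with
  | nil => intro st hst m hm; exact hst m hm
  | cons p l ih =>
    intro st hst m hm
    have hp := h p (by simp)
    refine ih (fun q hq => h q (List.mem_cons_of_mem _ hq)) (pvStepA rgb st p) ?_ m hm
    intro m' hm'
    rcases st with ⟨o, b⟩
    cases o with
    | none =>
      simp only [pvStepA, pvD] at hm'
      simp only [Option.some.injEq] at hm'
      simp only [pvD] at hp
      omega
    | some m0 =>
      have hm0 : Dj < m0 := hst m0 rfl
      simp only [pvStepA, pvD] at hm'
      split_ifs at hm' with hlt
      · simp only [Option.some.injEq] at hm'
        simp only [pvD] at hp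
        omega
      · simp only [Option.some.injEq] at hm'
        omega

lemma fold_argmin (rgb : List Int) (e : Nat → List Int) (n j : Nat) (hj : j < n)
    (hle : ∀ i, i < n → pvD rgb (e j) ≤ pvD rgb (e i))
    (hlt : ∀ i, i < j → pvD rgb (e j) < pvD rgb (e i)) :
    List.foldl (pvStepA rgb) (none, -1) ((List.range n).map (fun (i : Nat) => ((i : Int), e i)))
      = (some (pvD rgb (e j)), (j : Int)) := by
  have hsplit : List.range n
      = List.range j ++ [j] ++ (List.range (n - j - 1)).map (fun t => j + 1 + t) := by
    have h1 : List.range n = List.range j ++ (List.range (1 + (n - j - 1))).map (j + ·) := by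
      rw [← List.range_add]; congr 1; omega
    have h2 : List.range (1 + (n - j - 1)) = 0 :: (List.range (n - j - 1)).map (1 + ·) := by
      rw [List.range_add]; rfl
    rw [h1, h2]
    simp only [List.map_cons, List.map_map, List.append_assoc, List.singleton_append,
      Nat.add_zero, Function.comp_def]
    congr 1
    congr 1
    apply List.map_congr_left; intro t _; omega
  rw [hsplit]
  simp only [List.map_append, List.map_map, List.foldl_append]
  -- the prefix: indices < j, all strictly worse
  set st1 := List.foldl (pvStepA rgb) (none, -1) ((List.range j).map (fun (i : Nat) => ((i : Int), e i))) with hst1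
  have hpre : ∀ m, st1.1 = some m → pvD rgb (e j) < m := by
    apply fold_pre rgb (pvD rgb (e j))
    · intro p hp
      simp only [List.mem_map, List.mem_range] at hp
      obtain ⟨i, hi, rfl⟩ := hp
      exact hlt i hi
    · intro m hm; simp at hm
  -- the middle element j
  have hmid : List.foldl (pvStepA rgb) st1 ([j].map (fun (i : Nat) => ((i : Int), e i)))
      = (some (pvD rgb (e j)), (j : Int)) := by
    rcases hs : st1 with ⟨o, b⟩
    cases o with
    | none => simp [pvStepA, pvD]
    | some m =>
      have : pvD rgb (e j) < m := hpre m (by rw [hs])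
      simp only [List.map_cons, List.map_nil, List.foldl_cons, List.foldl_nil, pvStepA, pvD]
      rw [if_pos (by simpa [pvD] using this)]
  rw [hmid]
  -- the suffix: indices > j, all ≥
  apply fold_post
  intro p hp
  simp only [List.mem_map, List.mem_range] at hp
  obtain ⟨t, ht, rfl⟩ := hp
  exact hle (j + 1 + t) (by omega)

lemma pvEntry_digits (a b c : Nat) (ha : a < 4) (hb : b < 4) (hc : c < 4) :
    pvEntry (16 * a + 4 * b + c) = [85 * (a : Int), 85 * (b : Int), 85 * (c : Int)] := by
  have h1 : (16 * a + 4 * b + c) / 16 = a := by omega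
  have h2 : (16 * a + 4 * b + c) / 4 % 4 = b := by omega
  have h3 : (16 * a + 4 * b + c) % 4 = c := by omega
  simp [pvEntry, h1, h2, h3]

lemma D1 (r x y z : Int) : pvD [r] [x, y, z] = (r - x) ^ 2 := by simp [pvD]
lemma D2 (r g x y z : Int) : pvD [r, g] [x, y, z] = (r - x) ^ 2 + (g - y) ^ 2 := by
  simp [pvD]
lemma D3 (r g b x y z : Int) (rest : List Int) :
    pvD (r :: g :: b :: rest) [x, y, z] = (r - x) ^ 2 + (g - y) ^ 2 + (b - z) ^ 2 := by
  simp [pvD]; ring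

-- A on each input shape (zip truncates at min(len rgb, 3))
lemma A_nil : find_closest_color_index [] = 0 := by decide

lemma A_one (r : Int) : find_closest_color_index [r] = ((16 * pvQn r : Nat) : Int) := by
  unfold find_closest_color_index
  rw [palette_enum, fold_argmin [r] pvEntry 64 (16 * pvQn r)
    (by have := pvQn_lt r; omega)
    ?hle ?hlt]
  case hle =>
    intro i hi
    obtain ⟨a, b, c, ha, hb, hc, rfl⟩ : ∃ a b c, a < 4 ∧ b < 4 ∧ c < 4 ∧ i = 16 * a + 4 * b + c :=
      ⟨i / 16, i / 4 % 4, i % 4, by omega, by omega, by omega, by omega⟩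
    rw [show 16 * pvQn r = 16 * pvQn r + 4 * 0 + 0 by omega]
    rw [pvEntry_digits _ _ _ (pvQn_lt r) (by omega) (by omega),
        pvEntry_digits _ _ _ ha hb hc, D1, D1]
    exact ch_le r a ha
  case hlt =>
    intro i hi
    have hq1 := pvQn_lt r
    obtain ⟨a, b, c, ha, hb, hc, rfl⟩ : ∃ a b c, a < 4 ∧ b < 4 ∧ c < 4 ∧ i = 16 * a + 4 * b + c :=
      ⟨i / 16, i / 4 % 4, i % 4, by omega, by omega, by omega, by omega⟩
    rw [show 16 * pvQn r = 16 * pvQn r + 4 * 0 + 0 by omega]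
    rw [pvEntry_digits _ _ _ (pvQn_lt r) (by omega) (by omega),
        pvEntry_digits _ _ _ ha hb hc, D1, D1]
    exact ch_lt r a ha (by omega)

lemma A_two (r g : Int) :
    find_closest_color_index [r, g] = ((16 * pvQn r + 4 * pvQn g : Nat) : Int) := by
  unfold find_closest_color_index
  rw [palette_enum, fold_argmin [r, g] pvEntry 64 (16 * pvQn r + 4 * pvQn g)
    (by have := pvQn_lt r; have := pvQn_lt g; omega)
    ?hle ?hlt]
  case hle =>
    intro i hi
    obtain ⟨a, b, c, ha, hb, hc, rfl⟩ : ∃ a b c, a < 4 ∧ b < 4 ∧ c < 4 ∧ i = 16 * a + 4 * b + c :=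
      ⟨i / 16, i / 4 % 4, i % 4, by omega, by omega, by omega, by omega⟩
    rw [show 16 * pvQn r + 4 * pvQn g = 16 * pvQn r + 4 * pvQn g + 0 by omega]
    rw [pvEntry_digits _ _ _ (pvQn_lt r) (pvQn_lt g) (by omega),
        pvEntry_digits _ _ _ ha hb hc, D2, D2]
    have h1 := ch_le r a ha
    have h2 := ch_le g b hb
    omega
  case hlt =>
    intro i hi
    have hq1 := pvQn_lt r
    have hq2 := pvQn_lt g
    obtain ⟨a, b, c, ha, hb, hc, rfl⟩ : ∃ a b c, a < 4 ∧ b < 4 ∧ c < 4 ∧ i = 16 * a + 4 * b + c :=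
      ⟨i / 16, i / 4 % 4, i % 4, by omega, by omega, by omega, by omega⟩
    rw [show 16 * pvQn r + 4 * pvQn g = 16 * pvQn r + 4 * pvQn g + 0 by omega]
    rw [pvEntry_digits _ _ _ (pvQn_lt r) (pvQn_lt g) (by omega),
        pvEntry_digits _ _ _ ha hb hc, D2, D2]
    by_cases hra : a = pvQn r
    · have hgb : b ≠ pvQn g := by omega
      have h1 := ch_le r a ha
      have h2 := ch_lt g b hb hgb
      omega
    · have h1 := ch_lt r a ha hra
      have h2 := ch_le g b hb
      omega

lemma A_three (r g b : Int) (rest : List Int) :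
    find_closest_color_index (r :: g :: b :: rest)
      = ((16 * pvQn r + 4 * pvQn g + pvQn b : Nat) : Int) := by
  unfold find_closest_color_index
  rw [palette_enum, fold_argmin (r :: g :: b :: rest) pvEntry 64
    (16 * pvQn r + 4 * pvQn g + pvQn b)
    (by have := pvQn_lt r; have := pvQn_lt g; have := pvQn_lt b; omega)
    ?hle ?hlt]
  case hle =>
    intro i hi
    obtain ⟨a, b2, c, ha, hb, hc, rfl⟩ : ∃ a b2 c, a < 4 ∧ b2 < 4 ∧ c < 4 ∧ i = 16 * a + 4 * b2 + c :=
      ⟨i / 16, i / 4 % 4, i % 4, by omega, by omega, by omega, by omega⟩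
    rw [pvEntry_digits _ _ _ (pvQn_lt r) (pvQn_lt g) (pvQn_lt b),
        pvEntry_digits _ _ _ ha hb hc, D3, D3]
    have h1 := ch_le r a ha
    have h2 := ch_le g b2 hb
    have h3 := ch_le b c hc
    omega
  case hlt =>
    intro i hi
    have hq1 := pvQn_lt r
    have hq2 := pvQn_lt g
    have hq3 := pvQn_lt b
    obtain ⟨a, b2, c, ha, hb, hc, rfl⟩ : ∃ a b2 c, a < 4 ∧ b2 < 4 ∧ c < 4 ∧ i = 16 * a + 4 * b2 + c :=
      ⟨i / 16, i / 4 % 4, i % 4, by omega, by omega, by omega, by omega⟩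
    rw [pvEntry_digits _ _ _ (pvQn_lt r) (pvQn_lt g) (pvQn_lt b),
        pvEntry_digits _ _ _ ha hb hc, D3, D3]
    by_cases hra : a = pvQn r
    · by_cases hgb : b2 = pvQn g
      · have hbc : c ≠ pvQn b := by omega
        have h1 := ch_le r a ha
        have h2 := ch_le g b2 hb
        have h3 := ch_lt b c hc hbc
        omega
      · have h1 := ch_le r a ha
        have h2 := ch_lt g b2 hb hgb
        have h3 := ch_le b c hc
        omega
    · have h1 := ch_lt r a ha hra
      have h2 := ch_le g b2 hb
      have h3 := ch_le b c hc
      omega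

-- B on each input shape
lemma B_nil : find_closest_color_index_alt [] = 0 := by decide
lemma B_one (r : Int) : find_closest_color_index_alt [r] = pvQ r * 16 := by
  simp [find_closest_color_index_alt, List.range_succ]
lemma B_two (r g : Int) :
    find_closest_color_index_alt [r, g] = pvQ r * 16 + pvQ g * 4 := by
  simp [find_closest_color_index_alt, List.range_succ]
lemma B_three (r g b : Int) (rest : List Int) :
    find_closest_color_index_alt (r :: g :: b :: rest)
      = pvQ r * 16 + pvQ g * 4 + pvQ b := by
  simp [find_closest_color_index_alt, List.range_succ]

-- ===== VERDICT (by name: the statement is the Claim_ definition above) =====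
theorem find_closest_color_index_spec : Claim_equal_find_closest_color_index := by
  intro rgb _
  unfold Spec_find_closest_color_index
  match rgb with
  | [] => rw [A_nil, B_nil]
  | [r] => rw [A_one, B_one, pvQ_eq]; push_cast; ring
  | [r, g] => rw [A_two, B_two, pvQ_eq, pvQ_eq]; push_cast; ring
  | r :: g :: b :: rest => rw [A_three, B_three, pvQ_eq, pvQ_eq, pvQ_eq]; push_cast; ring
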